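-- pv_equiv track=rewrite | github.com/skreynolds/mit6.00.1x | problemSet_1/problem_3.py | item_order
-- ===== SOURCE A (Python) =====
-- def item_order(order):
--
--     order = order.split();
--
--     salad_count = 0;
--     water_count = 0;
--     hamburger_count = 0;
--
--     for e in order:
--         if e == 'salad':
--             salad_count += 1;
--         elif e == 'water':
--             water_count += 1;
--         elif e == 'hamburger':
--             hamburger_count +=1;
--
--     return('salad:' + str(salad_count)
--                + ' ' + 'hamburger:' + str(hamburger_count)
--                + ' ' + 'water:' + str(water_count))
-- ===== SOURCE B (Python) =====
-- def item_order(order):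
--     # Sort the words, then run-length scan the sorted list: each maximal run of
--     # equal words contributes its length to that word's total.
--     words = sorted(order.split())
--     counts = {}
--     while words:
--         head = words[0]
--         i = 1
--         while i < len(words) and words[i] == head:
--             i += 1
--         counts[head] = counts.get(head, 0) + i
--         words = words[i:]
--     return ('salad:' + str(counts.get('salad', 0))
--             + ' hamburger:' + str(counts.get('hamburger', 0))
--             + ' water:' + str(counts.get('water', 0)))
-- ===== Notes on version B (the rewrite author's own statement) =====
-- stated objective: alternative
-- what changed: Replaces the single branching counter loop with sort-then-group: sort the split words, run-length scan the sorted list into a dict of group sizes, then look up the three tokens; same output string.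
import Mathlib
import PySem

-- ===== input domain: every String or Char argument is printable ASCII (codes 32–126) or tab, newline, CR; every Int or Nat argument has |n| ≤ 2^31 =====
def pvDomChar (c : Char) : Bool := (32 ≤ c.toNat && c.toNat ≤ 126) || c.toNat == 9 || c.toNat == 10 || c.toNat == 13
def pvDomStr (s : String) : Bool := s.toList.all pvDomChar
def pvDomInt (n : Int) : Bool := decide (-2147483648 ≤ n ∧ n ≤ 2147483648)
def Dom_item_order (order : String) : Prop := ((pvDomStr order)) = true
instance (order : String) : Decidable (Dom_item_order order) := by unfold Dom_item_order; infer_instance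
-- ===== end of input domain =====

-- B: alternative algorithm — sort the words, then run-length scan the sorted list

-- ===== PORT A =====
def item_order (order : String) : String :=
  let words := PySem.Str.split₀ order
  let counts := words.foldl
    (fun (st : Int × Int × Int) e =>
      if e == "salad" then (st.1 + 1, st.2.1, st.2.2)
      else if e == "water" then (st.1, st.2.1 + 1, st.2.2)
      else if e == "hamburger" then (st.1, st.2.1, st.2.2 + 1)
      else st)
    (0, 0, 0)
  "salad:" ++ PySem.Int.toStr counts.1
    ++ " " ++ "hamburger:" ++ PySem.Int.toStr counts.2.2
    ++ " " ++ "water:" ++ PySem.Int.toStr counts.2.1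

-- ===== PORT B =====
-- The outer while loop of Source B: take the maximal run of the head word, record
-- its length, continue on the remaining suffix (the inner while = takeWhile).
def pvRunScan (words : List String) (counts : PySem.Dict String Int) : PySem.Dict String Int :=
  match words with
  | [] => counts
  | head :: rest =>
      let run := rest.takeWhile (· == head)
      pvRunScan (rest.drop run.length)
        (counts.insert head (counts.getD head 0 + (1 + run.length : Int)))
termination_by words.length
decreasing_by
  simp only [List.length_drop, List.length_cons]
  omega

def item_order_alt (order : String) : String :=
  let words := PySem.List.sorted (PySem.Str.split₀ order) (fun w => w) false
  let counts := pvRunScan words PySem.Dict.empty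
  "salad:" ++ PySem.Int.toStr (counts.getD "salad" 0)
    ++ " hamburger:" ++ PySem.Int.toStr (counts.getD "hamburger" 0)
    ++ " water:" ++ PySem.Int.toStr (counts.getD "water" 0)

-- ===== PRECONDITION & SPEC =====
def Spec_item_order (order : String) (out : String) : Prop := out = item_order_alt order
instance (order : String) (out : String) : Decidable (Spec_item_order order out) := by unfold Spec_item_order; infer_instance

-- ===== CLAIM (what is proved, stated in full; the proofs are below) =====
def Claim_equal_item_order : Prop := ∀ (order : String), Dom_item_order order → Spec_item_order order (item_order order)

-- ===== LEMMAS AND PROOFS =====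
theorem item_order_foldl (ws : List String) (a b c : Int) :
    ws.foldl
      (fun (st : Int × Int × Int) e =>
        if e == "salad" then (st.1 + 1, st.2.1, st.2.2)
        else if e == "water" then (st.1, st.2.1 + 1, st.2.2)
        else if e == "hamburger" then (st.1, st.2.1, st.2.2 + 1)
        else st)
      (a, b, c)
    = (a + ws.count "salad", b + ws.count "water", c + ws.count "hamburger") := by
  induction ws generalizing a b c with
  | nil => simp
  | cons w ws ih =>
    rw [List.foldl_cons]
    by_cases hs : w = "salad"
    · have h1 : (w == "salad") = true := by simp [hs]
      simp only [h1, if_true]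
      rw [ih]; simp [hs]; ring
    · have h1 : (w == "salad") = false := by simp [hs]
      by_cases hw : w = "water"
      · have h2 : (w == "water") = true := by simp [hw]
        simp only [h1, h2, Bool.false_eq_true, if_false, if_true]
        rw [ih]; simp [hw]; ring
      · have h2 : (w == "water") = false := by simp [hw]
        by_cases hh : w = "hamburger"
        · have h3 : (w == "hamburger") = true := by simp [hh]
          simp only [h1, h2, h3, Bool.false_eq_true, if_false, if_true]
          rw [ih]; simp [hh]; ring
        · have h3 : (w == "hamburger") = false := by simp [hh]
          simp only [h1, h2, h3, Bool.false_eq_true, if_false]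
          rw [ih]; simp [hs, hw, hh]

-- the run-length scan totals, for ANY word list, exactly the occurrence counts
theorem pvDrop_takeWhile {α : Type} (p : α → Bool) (l : List α) :
    l.drop (l.takeWhile p).length = l.dropWhile p := by
  induction l with
  | nil => rfl
  | cons x xs ih =>
    by_cases h : p x
    · simpa [h] using ih
    · simp [h]

theorem pvRunScan_getD (ws : List String) (d : PySem.Dict String Int) (w : String) :
    (pvRunScan ws d).getD w 0 = d.getD w 0 + (ws.count w : Int) := by
  induction ws, d using pvRunScan.induct with
  | case1 d => simp [pvRunScan]
  | case2 d head rest run ih =>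
    rw [pvRunScan]
    rw [ih, pvDrop_takeWhile, PySem.Dict.getD_insert]
    have hc : rest.count w
        = (rest.takeWhile (· == head)).count w + (rest.dropWhile (· == head)).count w := by
      conv_lhs => rw [← List.takeWhile_append_dropWhile (p := (· == head)) (l := rest)]
      rw [List.count_append]
    by_cases hw : w = head
    · subst hw
      have hcnt : (rest.takeWhile (· == w)).count w = (rest.takeWhile (· == w)).length := by
        rw [List.count_eq_length]
        intro b hb
        have hbw := List.mem_takeWhile_imp hb
        exact (eq_of_beq (by simpa using hbw)).symm
      rw [if_pos rfl, List.count_cons_self]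
      push_cast [hc, hcnt]
      ring
    · have hcnt : (rest.takeWhile (· == head)).count w = 0 := by
        rw [List.count_eq_zero]
        intro hmem
        have hwh := List.mem_takeWhile_imp hmem
        exact hw (eq_of_beq (by simpa using hwh))
      rw [if_neg hw]
      have hw' : ¬head = w := fun h => hw h.symm
      have hcons : (head :: rest).count w = rest.count w := by
        simp [hw']
      rw [hcons, hc, hcnt]
      push_cast
      ring

-- ===== VERDICT (by name: the statement is the Claim_ definition above) =====
theorem item_order_spec : Claim_equal_item_order := by
  intro order _
  unfold Spec_item_order item_order item_order_alt
  have hperm := PySem.List.sorted_perm (PySem.Str.split₀ order) (fun w => w) false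
  simp only [item_order_foldl, pvRunScan_getD, PySem.Dict.getD_empty, hperm.count_eq]
  simp [String.append_assoc]
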